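-- pv_equiv track=rewrite | github.com/shravdhore26/sentinel-text-pro | backend/utils.py | rule_engine
-- ===== SOURCE A (Python) =====
-- URGENCY = ["urgent", "immediately", "now", "asap", "fast"]
--
-- AUTHORITY = ["ceo", "manager", "admin", "it support"]
--
-- SENSITIVE = ["password", "otp", "transfer", "bank"]
--
-- def rule_engine(text):
--     score = 0
--     indicators = []
--
--     if any(w in text for w in URGENCY):
--         score += 20
--         indicators.append("Urgency manipulation detected (e.g., 'fast', 'immediately')")
--
--     if any(w in text for w in AUTHORITY):
--         score += 25
--         indicators.append("Authority impersonation detected (e.g., 'CEO', 'manager')")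
--
--     if any(w in text for w in SENSITIVE):
--         score += 30
--         indicators.append("Sensitive credential request detected (e.g., 'OTP', 'password')")
--
--     return score, indicators
-- ===== SOURCE B (Python) =====
-- URGENCY = ["urgent", "immediately", "now", "asap", "fast"]
-- AUTHORITY = ["ceo", "manager", "admin", "it support"]
-- SENSITIVE = ["password", "otp", "transfer", "bank"]
--
-- def rule_engine(text):
--     # Single left-to-right scan: at each character position test whether a keyword
--     # of each category starts there, instead of one substring search per keyword.
--     u = a = s = False
--     for i in range(len(text)):
--         u = u or text.startswith(tuple(URGENCY), i)
--         a = a or text.startswith(tuple(AUTHORITY), i)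
--         s = s or text.startswith(tuple(SENSITIVE), i)
--     score = (20 if u else 0) + (25 if a else 0) + (30 if s else 0)
--     indicators = [m for hit, m in (
--         (u, "Urgency manipulation detected (e.g., 'fast', 'immediately')"),
--         (a, "Authority impersonation detected (e.g., 'CEO', 'manager')"),
--         (s, "Sensitive credential request detected (e.g., 'OTP', 'password')"),
--     ) if hit]
--     return score, indicators
-- ===== Notes on version B (the rewrite author's own statement) =====
-- stated objective: alternative
-- what changed: B abandons the per-keyword whole-text substring searches and instead makes a single left-to-right scan over the text positions, testing at each position whether a keyword of each category starts there and OR-ing the result into three category flags, from which score and indicators are assembled arithmetically and by a comprehension.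
import Mathlib
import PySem

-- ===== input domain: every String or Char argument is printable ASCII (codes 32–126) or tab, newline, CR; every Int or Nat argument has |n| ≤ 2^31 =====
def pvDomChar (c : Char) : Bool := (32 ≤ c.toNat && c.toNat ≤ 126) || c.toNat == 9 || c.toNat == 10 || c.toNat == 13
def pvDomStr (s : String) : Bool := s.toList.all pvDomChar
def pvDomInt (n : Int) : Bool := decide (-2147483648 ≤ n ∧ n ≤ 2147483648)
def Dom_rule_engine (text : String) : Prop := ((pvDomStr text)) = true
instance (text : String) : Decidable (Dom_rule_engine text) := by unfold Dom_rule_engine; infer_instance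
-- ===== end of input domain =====

-- B replaces A's per-keyword substring searches by one left-to-right scan of the text
-- testing keyword prefixes at each position; same output, no speed claim (objective: alternative).
-- ===== PORT A =====
def pvURGENCY : List String := ["urgent", "immediately", "now", "asap", "fast"]
def pvAUTHORITY : List String := ["ceo", "manager", "admin", "it support"]
def pvSENSITIVE : List String := ["password", "otp", "transfer", "bank"]

def rule_engine (text : String) : Int × List String :=
  let score : Int := 0
  let indicators : List String := []
  let (score, indicators) :=
    if pvURGENCY.any (fun w => PySem.Str.isIn w text) then
      (score + 20, indicators ++ ["Urgency manipulation detected (e.g., 'fast', 'immediately')"])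
    else (score, indicators)
  let (score, indicators) :=
    if pvAUTHORITY.any (fun w => PySem.Str.isIn w text) then
      (score + 25, indicators ++ ["Authority impersonation detected (e.g., 'CEO', 'manager')"])
    else (score, indicators)
  let (score, indicators) :=
    if pvSENSITIVE.any (fun w => PySem.Str.isIn w text) then
      (score + 30, indicators ++ ["Sensitive credential request detected (e.g., 'OTP', 'password')"])
    else (score, indicators)
  (score, indicators)

-- ===== PORT B =====
-- text.startswith(w, i) with 0 ≤ i is exactly "w.toList is a prefix of text.toList.drop i";
-- ported via PySem.Chars.startswith on the dropped character list (exact on that domain).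
def pvScanStep (cs : List Char) (st : Bool × Bool × Bool) (i : Nat) : Bool × Bool × Bool :=
  (st.1 || pvURGENCY.any (fun w => PySem.Chars.startswith (cs.drop i) w.toList),
   st.2.1 || pvAUTHORITY.any (fun w => PySem.Chars.startswith (cs.drop i) w.toList),
   st.2.2 || pvSENSITIVE.any (fun w => PySem.Chars.startswith (cs.drop i) w.toList))

def rule_engine_alt (text : String) : Int × List String :=
  let cs := text.toList
  let (u, a, s) := (List.range cs.length).foldl (pvScanStep cs) (false, false, false)
  let score : Int := (if u then 20 else 0) + (if a then 25 else 0) + (if s then 30 else 0)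
  let indicators :=
    (([(u, "Urgency manipulation detected (e.g., 'fast', 'immediately')"),
       (a, "Authority impersonation detected (e.g., 'CEO', 'manager')"),
       (s, "Sensitive credential request detected (e.g., 'OTP', 'password')")].filter
        (fun p => p.1)).map (fun p => p.2))
  (score, indicators)

-- ===== PRECONDITION & SPEC =====
def Spec_rule_engine (text : String) (out : Int × List String) : Prop := out = rule_engine_alt text
instance (text : String) (out : Int × List String) : Decidable (Spec_rule_engine text out) := by unfold Spec_rule_engine; infer_instance

-- ===== CLAIM (what is proved, stated in full; the proofs are below) =====
def Claim_equal_rule_engine : Prop := ∀ (text : String), Dom_rule_engine text → Spec_rule_engine text (rule_engine text)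

-- ===== LEMMAS AND PROOFS =====

-- The scan fold just ORs per-position matches into each flag.
theorem foldl_scanStep (cs : List Char) (l : List Nat) (b0 b1 b2 : Bool) :
    l.foldl (pvScanStep cs) (b0, b1, b2) =
      (b0 || l.any (fun i => pvURGENCY.any (fun w => PySem.Chars.startswith (cs.drop i) w.toList)),
       b1 || l.any (fun i => pvAUTHORITY.any (fun w => PySem.Chars.startswith (cs.drop i) w.toList)),
       b2 || l.any (fun i => pvSENSITIVE.any (fun w => PySem.Chars.startswith (cs.drop i) w.toList))) := by
  induction l generalizing b0 b1 b2 with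
  | nil => simp
  | cons x xs ih =>
      simp only [List.foldl_cons, List.any_cons, pvScanStep, ih, Bool.or_assoc]

-- For a nonempty keyword, "some position of cs starts with it" is exactly "it occurs in cs".
theorem scan_any_eq_isIn (w cs : List Char) (hw : w ≠ []) :
    ((List.range cs.length).any fun i => PySem.Chars.startswith (cs.drop i) w) =
      PySem.Chars.isIn w cs := by
  rw [Bool.eq_iff_iff]
  simp only [List.any_eq_true, List.mem_range, PySem.Chars.startswith_iff]
  rw [← PySem.Chars.exists_prefix_drop_iff_isIn]
  constructor
  · rintro ⟨i, _, h⟩; exact ⟨i, h⟩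
  · rintro ⟨j, h⟩
    by_cases hj : j < cs.length
    · exact ⟨j, hj, h⟩
    · exfalso
      have : cs.drop j = [] := List.drop_eq_nil_of_le (le_of_not_gt hj)
      rw [this] at h
      exact hw (List.prefix_nil.mp h)

-- Swap the two 'any's and apply scan_any_eq_isIn to each (nonempty) keyword of L.
theorem category_scan (L : List String) (cs : List Char)
    (hL : ∀ w ∈ L, w.toList ≠ []) :
    ((List.range cs.length).any fun i => L.any fun w => PySem.Chars.startswith (cs.drop i) w.toList) =
      L.any fun w => PySem.Chars.isIn w.toList cs := by
  rw [Bool.eq_iff_iff]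
  simp only [List.any_eq_true]
  constructor
  · rintro ⟨i, hi, w, hw, h⟩
    refine ⟨w, hw, ?_⟩
    rw [← scan_any_eq_isIn w.toList cs (hL w hw)]
    simp only [List.any_eq_true]
    exact ⟨i, hi, h⟩
  · rintro ⟨w, hw, h⟩
    rw [← scan_any_eq_isIn w.toList cs (hL w hw)] at h
    simp only [List.any_eq_true] at h
    obtain ⟨i, hi, hp⟩ := h
    exact ⟨i, hi, w, hw, hp⟩

-- ===== VERDICT (by name: the statement is the Claim_ definition above) =====
theorem rule_engine_spec : Claim_equal_rule_engine := by
  intro text _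
  unfold Spec_rule_engine rule_engine rule_engine_alt
  have e1 : ((List.range text.toList.length).any fun i =>
      pvURGENCY.any fun w => PySem.Chars.startswith (text.toList.drop i) w.toList) =
      pvURGENCY.any fun w => PySem.Str.isIn w text := by
    rw [category_scan pvURGENCY text.toList (by decide)]; simp
  have e2 : ((List.range text.toList.length).any fun i =>
      pvAUTHORITY.any fun w => PySem.Chars.startswith (text.toList.drop i) w.toList) =
      pvAUTHORITY.any fun w => PySem.Str.isIn w text := by
    rw [category_scan pvAUTHORITY text.toList (by decide)]; simp
  have e3 : ((List.range text.toList.length).any fun i =>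
      pvSENSITIVE.any fun w => PySem.Chars.startswith (text.toList.drop i) w.toList) =
      pvSENSITIVE.any fun w => PySem.Str.isIn w text := by
    rw [category_scan pvSENSITIVE text.toList (by decide)]; simp
  simp only [foldl_scanStep, Bool.false_or, e1, e2, e3]
  cases hU : pvURGENCY.any (fun w => PySem.Str.isIn w text) <;>
    cases hA : pvAUTHORITY.any (fun w => PySem.Str.isIn w text) <;>
      cases hS : pvSENSITIVE.any (fun w => PySem.Str.isIn w text) <;>
        simp
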